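-- pv_equiv track=rewrite | github.com/Lil-Gypsophila/Spelling-Correction-System | GUI.py | char_index_to_tk_index
-- ===== SOURCE A (Python) =====
-- def char_index_to_tk_index(char_index, text):
--
--     # Preserve line endings to account for accurate indexing
--     lines = text.splitlines(keepends = True)
--     current_index = 0
--
--     for line_num, line in enumerate(lines, start = 1):
--
--         # Calculate the end index of the current line
--         line_length = len(line)
--
--         # If the character index falls within the current line, calculate the column
--         if current_index <= char_index < current_index + line_length:
--             column = char_index - current_index
--             return f"{line_num}.{column}"
--         current_index += line_length
--
--     # Fallback to the end of the text
--     return f"{len(lines)}.{len(lines[-1]) if lines else 0}"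
-- ===== SOURCE B (Python) =====
-- def char_index_to_tk_index(char_index, text):
--     # Prefix-offset table + binary search instead of a sequential cumulative scan.
--     lines = text.splitlines(keepends=True)
--     if 0 <= char_index < len(text):
--         starts = []
--         cur = 0
--         for line in lines:
--             starts.append(cur)
--             cur += len(line)
--         # binary search: rightmost insertion point of char_index in starts
--         lo, hi = 0, len(starts)
--         while lo < hi:
--             mid = (lo + hi) // 2
--             if starts[mid] <= char_index:
--                 lo = mid + 1
--             else:
--                 hi = mid
--         i = lo - 1
--         return f"{i + 1}.{char_index - starts[i]}"
--     return f"{len(lines)}.{len(lines[-1]) if lines else 0}"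
-- ===== Notes on version B (the rewrite author's own statement) =====
-- stated objective: alternative
-- what changed: Replaces A's single sequential scan that carries a running character offset through the lines with a prefix-offset table built once plus a binary search (bisect_right-style while loop) for the line containing char_index; the out-of-range fallback is the same expression.
import Mathlib
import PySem

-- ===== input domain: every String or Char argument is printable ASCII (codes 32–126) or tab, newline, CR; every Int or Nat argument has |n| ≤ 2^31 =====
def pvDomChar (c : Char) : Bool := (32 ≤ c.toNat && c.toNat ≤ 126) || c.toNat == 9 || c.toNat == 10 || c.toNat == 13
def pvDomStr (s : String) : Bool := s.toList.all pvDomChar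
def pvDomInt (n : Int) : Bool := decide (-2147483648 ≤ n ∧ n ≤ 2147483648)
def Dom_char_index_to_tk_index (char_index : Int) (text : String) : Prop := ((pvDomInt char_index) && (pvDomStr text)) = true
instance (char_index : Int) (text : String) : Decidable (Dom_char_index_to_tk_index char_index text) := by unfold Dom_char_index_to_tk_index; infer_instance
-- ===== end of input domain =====

-- B replaces A's sequential cumulative scan by a prefix-offset table plus binary search (alternative decomposition).

-- shared library call text.splitlines(keepends=True) (PySem has no keepends variant, so it is ported by
-- hand); exact for the line breaks '\n', '\r', '\r\n' — the only break characters the domain admits.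
def splitKeepGo (acc : List Char) (cs : List Char) : List (List Char) :=
  match cs with
  | [] => if acc.isEmpty then [] else [acc.reverse]
  | '\r' :: '\n' :: rest => (acc.reverse ++ ['\r', '\n']) :: splitKeepGo [] rest
  | c :: rest =>
    if c = '\n' then (acc.reverse ++ ['\n']) :: splitKeepGo [] rest
    else if c = '\r' then (acc.reverse ++ ['\r']) :: splitKeepGo [] rest
    else splitKeepGo (c :: acc) rest

def splitKeep (cs : List Char) : List (List Char) := splitKeepGo [] cs

-- f"{a}.{b}"
def fmtTk (a b : Int) : String := PySem.Int.toStr a ++ "." ++ PySem.Int.toStr b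

-- fallback f"{len(lines)}.{len(lines[-1]) if lines else 0}"  (identical code in both Pythons)
def tkFallback (lines : List (List Char)) : String :=
  fmtTk (lines.length : Int) (match lines.getLast? with | some l => (l.length : Int) | none => 0)

-- ===== PORT A =====
-- the for-loop over enumerate(lines, start=1) with running current_index
def aLoop (ci : Int) (lines : List (List Char)) (lineNum : Int) (cur : Int) : Option String :=
  match lines with
  | [] => none
  | line :: rest =>
    let lineLength : Int := (line.length : Int)
    if cur ≤ ci ∧ ci < cur + lineLength then
      some (fmtTk lineNum (ci - cur))
    else aLoop ci rest (lineNum + 1) (cur + lineLength)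

def char_index_to_tk_index (char_index : Int) (text : String) : String :=
  let lines := splitKeep text.toList
  match aLoop char_index lines 1 0 with
  | some s => s
  | none => tkFallback lines

-- ===== PORT B =====
-- starts = []; cur = 0; for line in lines: starts.append(cur); cur += len(line)
def buildStarts (lines : List (List Char)) (cur : Int) : List Int :=
  match lines with
  | [] => []
  | line :: rest => cur :: buildStarts rest (cur + (line.length : Int))

-- while lo < hi: mid = (lo + hi) // 2 …  (lo, hi are nonnegative ints in Source B, so Nat with Nat '/'
-- is exact for '//'; starts[mid] is always in range, so getD's default is never read)
def bsearch (starts : List Int) (ci : Int) (lo hi : Nat) : Nat :=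
  if _h : lo < hi then
    let mid := (lo + hi) / 2
    if starts.getD mid 0 ≤ ci then bsearch starts ci (mid + 1) hi
    else bsearch starts ci lo mid
  else lo
termination_by hi - lo
decreasing_by all_goals omega

def char_index_to_tk_index_alt (char_index : Int) (text : String) : String :=
  let cs := text.toList
  let lines := splitKeep cs
  if 0 ≤ char_index ∧ char_index < (cs.length : Int) then
    let starts := buildStarts lines 0
    let i := bsearch starts char_index 0 starts.length - 1
    fmtTk ((i : Int) + 1) (char_index - starts.getD i 0)
  else tkFallback lines

-- ===== PRECONDITION & SPEC =====
def Spec_char_index_to_tk_index (char_index : Int) (text : String) (out : String) : Prop := out = char_index_to_tk_index_alt char_index text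
instance (char_index : Int) (text : String) (out : String) : Decidable (Spec_char_index_to_tk_index char_index text out) := by unfold Spec_char_index_to_tk_index; infer_instance

-- ===== CLAIM (what is proved, stated in full; the proofs are below) =====
def Claim_equal_char_index_to_tk_index : Prop := ∀ (char_index : Int) (text : String), Dom_char_index_to_tk_index char_index text → Spec_char_index_to_tk_index char_index text (char_index_to_tk_index char_index text)

-- ===== LEMMAS AND PROOFS =====

-- prefix sum of line lengths
def pref (lines : List (List Char)) (k : Nat) : Int :=
  ((lines.take k).map (fun l => (l.length : Int))).sum

theorem pref_zero (lines : List (List Char)) : pref lines 0 = 0 := rfl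

theorem pref_succ (l : List Char) (rest : List (List Char)) (k : Nat) :
    pref (l :: rest) (k + 1) = (l.length : Int) + pref rest k := by
  simp [pref]

theorem pref_mono (lines : List (List Char)) {j k : Nat} (h : j ≤ k) :
    pref lines j ≤ pref lines k := by
  induction lines generalizing j k with
  | nil => simp [pref]
  | cons l rest ih =>
    cases j with
    | zero =>
      cases k with
      | zero => simp [pref]
      | succ k =>
        rw [pref_zero, pref_succ]
        have h1 : (0:Int) ≤ pref rest k := by
          simpa [pref_zero] using ih (j := 0) (k := k) (Nat.zero_le k)
        positivity
    | succ j =>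
      cases k with
      | zero => omega
      | succ k =>
        rw [pref_succ, pref_succ]
        have := ih (j := j) (k := k) (by omega)
        omega

theorem splitKeepGo_flatten (acc cs : List Char) :
    (splitKeepGo acc cs).flatten = acc.reverse ++ cs := by
  fun_induction splitKeepGo acc cs <;> simp_all [List.isEmpty_iff]

-- whole-text length = sum of kept-line lengths
theorem pref_splitKeep (cs : List Char) :
    pref (splitKeep cs) (splitKeep cs).length = (cs.length : Int) := by
  have h2 : (splitKeep cs).flatten.length = cs.length := by
    simp [splitKeep, splitKeepGo_flatten]
  calc pref (splitKeep cs) (splitKeep cs).length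
      = (((splitKeep cs).map List.length).sum : Nat) := by
        simp [pref, Nat.cast_list_sum, List.map_map, Function.comp_def]
    _ = ((splitKeep cs).flatten.length : Nat) := by rw [List.length_flatten]
    _ = (cs.length : Int) := by rw [h2]

-- buildStarts facts
theorem buildStarts_length (lines : List (List Char)) (cur : Int) :
    (buildStarts lines cur).length = lines.length := by
  induction lines generalizing cur with
  | nil => rfl
  | cons l rest ih => simp [buildStarts, ih]

theorem buildStarts_getD (lines : List (List Char)) (cur : Int) (k : Nat)
    (hk : k < lines.length) :
    (buildStarts lines cur).getD k 0 = cur + pref lines k := by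
  induction lines generalizing cur k with
  | nil => simp at hk
  | cons l rest ih =>
    cases k with
    | zero => simp [buildStarts, pref_zero]
    | succ k =>
      have hk' : k < rest.length := by simpa using hk
      simp only [buildStarts, List.getD_cons_succ]
      rw [ih (cur + (l.length : Int)) k hk', pref_succ]
      ring

-- starts table is nondecreasing
theorem buildStarts_mono (lines : List (List Char)) {j k : Nat} (hjk : j ≤ k)
    (hk : k < lines.length) :
    (buildStarts lines 0).getD j 0 ≤ (buildStarts lines 0).getD k 0 := by
  rw [buildStarts_getD lines 0 j (by omega), buildStarts_getD lines 0 k hk]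
  have := pref_mono lines hjk
  omega

-- A's loop returns none when ci is left of cur or right of all lines
theorem aLoop_none (ci : Int) (lines : List (List Char)) (num cur : Int)
    (h : ci < cur ∨ cur + pref lines lines.length ≤ ci) :
    aLoop ci lines num cur = none := by
  induction lines generalizing num cur with
  | nil => rfl
  | cons l rest ih =>
    have hps : pref (l :: rest) (rest.length + 1) = (l.length : Int) + pref rest rest.length :=
      pref_succ l rest rest.length
    have h0 : (0:Int) ≤ pref rest rest.length := by
      simpa [pref_zero] using pref_mono rest (j := 0) (k := rest.length) (Nat.zero_le _)
    simp only [List.length_cons] at h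
    rw [hps] at h
    simp only [aLoop]
    rw [if_neg (by omega)]
    apply ih
    omega

-- A's loop finds the (unique) line whose half-open span contains ci
theorem aLoop_found (ci : Int) (lines : List (List Char)) (num cur : Int) (j : Nat)
    (hj : j < lines.length)
    (h1 : cur + pref lines j ≤ ci) (h2 : ci < cur + pref lines (j + 1)) :
    aLoop ci lines num cur = some (fmtTk (num + (j : Int)) (ci - (cur + pref lines j))) := by
  induction lines generalizing num cur j with
  | nil => simp at hj
  | cons l rest ih =>
    cases j with
    | zero =>
      rw [pref_zero] at h1 ⊢
      rw [pref_succ, pref_zero] at h2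
      simp only [aLoop]
      rw [if_pos (by omega)]
      norm_num
    | succ j =>
      have hj' : j < rest.length := by simpa using hj
      rw [pref_succ] at h1 h2 ⊢
      have hlen : (0:Int) ≤ pref rest j := by
        simpa [pref_zero] using pref_mono rest (j := 0) (k := j) (Nat.zero_le _)
      simp only [aLoop]
      rw [if_neg (by omega)]
      rw [ih (num + 1) (cur + (l.length : Int)) j hj' (by omega) (by omega)]
      congr 2
      · push_cast; ring
      · ring

-- binary-search invariant
theorem bsearch_spec (starts : List Int) (ci : Int)
    (hsort : ∀ j k : Nat, j ≤ k → k < starts.length → starts.getD j 0 ≤ starts.getD k 0)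
    (lo hi : Nat) :
    lo ≤ hi → hi ≤ starts.length →
    (∀ j, j < lo → starts.getD j 0 ≤ ci) →
    (∀ j, hi ≤ j → j < starts.length → ci < starts.getD j 0) →
    lo ≤ bsearch starts ci lo hi ∧ bsearch starts ci lo hi ≤ hi ∧
    (∀ j, j < bsearch starts ci lo hi → starts.getD j 0 ≤ ci) ∧
    (∀ j, bsearch starts ci lo hi ≤ j → j < starts.length → ci < starts.getD j 0) := by
  fun_induction bsearch starts ci lo hi with
  | case1 lo hi h mid hle ih =>
    intro hlohi hhi hlow hhigh
    have hmid : mid < hi := by simp only [mid]; omega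
    have hres := ih (by omega) hhi
      (by intro j hj
          have : starts.getD j 0 ≤ starts.getD mid 0 :=
            hsort j mid (by omega) (by omega)
          omega)
      hhigh
    refine ⟨by omega, hres.2.1, hres.2.2.1, hres.2.2.2⟩
  | case2 lo hi h mid hle ih =>
    intro hlohi hhi hlow hhigh
    have hmid : lo ≤ mid ∧ mid < hi := by constructor <;> (simp only [mid]; omega)
    have hres := ih (by omega) (by omega) hlow
      (by intro j hj hjlen
          have : starts.getD mid 0 ≤ starts.getD j 0 := hsort mid j hj hjlen
          omega)
    refine ⟨hres.1, by omega, hres.2.2.1, hres.2.2.2⟩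
  | case3 lo hi h =>
    intro hlohi hhi hlow hhigh
    exact ⟨le_refl lo, by omega, hlow, fun j hj hjlen => hhigh j (by omega) hjlen⟩

-- ===== VERDICT (by name: the statement is the Claim_ definition above) =====
theorem char_index_to_tk_index_spec : Claim_equal_char_index_to_tk_index := by
  intro ci text _hdom
  unfold Spec_char_index_to_tk_index char_index_to_tk_index char_index_to_tk_index_alt
  dsimp only
  set cs := text.toList with hcs
  set lines := splitKeep cs with hlines
  have htot : pref lines lines.length = (cs.length : Int) := pref_splitKeep cs
  by_cases hin : 0 ≤ ci ∧ ci < (cs.length : Int)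
  · -- in range: A's scan and B's binary search find the same line
    have hlt : ci < pref lines lines.length := htot ▸ hin.2
    have hne : 0 < lines.length := by
      rcases Nat.eq_zero_or_pos lines.length with h0 | h0
      · rw [h0] at hlt; rw [pref_zero] at hlt; omega
      · exact h0
    -- the containing line: least j with ci < pref lines (j+1)
    have hex : ∃ k, ci < pref lines (k + 1) := by
      refine ⟨lines.length - 1, ?_⟩
      have : lines.length - 1 + 1 = lines.length := by omega
      rw [this]; exact hlt
    set j := Nat.find hex with hj
    have hj2 : ci < pref lines (j + 1) := Nat.find_spec hex
    have hjlt : j < lines.length := by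
      have := Nat.find_min' hex (m := lines.length - 1) (by
        have : lines.length - 1 + 1 = lines.length := by omega
        rw [this]; exact hlt)
      omega
    have hj1 : pref lines j ≤ ci := by
      cases hjj : j with
      | zero => rw [pref_zero]; exact hin.1
      | succ k =>
        have := Nat.find_min hex (m := k) (by omega)
        omega
    -- A side
    rw [aLoop_found ci lines 1 0 j hjlt (by rw [zero_add]; exact hj1) (by rw [zero_add]; exact hj2)]
    -- B side
    rw [if_pos hin]
    set starts := buildStarts lines 0 with hstarts
    have hslen : starts.length = lines.length := buildStarts_length lines 0
    have hgetD : ∀ k, k < lines.length → starts.getD k 0 = pref lines k := by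
      intro k hk
      rw [hstarts, buildStarts_getD lines 0 k hk, zero_add]
    have hsort : ∀ a b : Nat, a ≤ b → b < starts.length → starts.getD a 0 ≤ starts.getD b 0 := by
      intro a b hab hb
      exact buildStarts_mono lines hab (hslen ▸ hb)
    obtain ⟨hr1, hr2, hr3, hr4⟩ := bsearch_spec starts ci hsort 0 starts.length
      (Nat.zero_le _) (le_refl _) (by omega) (by omega)
    set r := bsearch starts ci 0 starts.length with hrdef
    have hreq : r = j + 1 := by
      by_contra hne'
      rcases Nat.lt_or_ge r (j + 1) with hc | hc
      · -- r ≤ j: then ci < starts[r] = pref r ≤ pref j ≤ ci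
        have hrlen : r < starts.length := by omega
        have := hr4 r (le_refl r) hrlen
        rw [hgetD r (by omega)] at this
        have := pref_mono lines (j := r) (k := j) (by omega)
        omega
      · -- j + 1 < r: then starts[j+1] = pref (j+1) ≤ ci, contra hj2
        have hc' : j + 1 < r := by omega
        have hjl : j + 1 < starts.length := by omega
        have := hr3 (j + 1) hc'
        rw [hgetD (j + 1) (by omega)] at this
        omega
    have hieq : r - 1 = j := by omega
    rw [hieq, hgetD j hjlt]
    have e1 : (1:Int) + (j:Int) = (j:Int) + 1 := by ring
    have e2 : ci - (0 + pref lines j) = ci - pref lines j := by ring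
    dsimp only
    rw [e1, e2]
  · -- out of range: A's loop finds nothing, both take the fallback
    rw [aLoop_none ci lines 1 0 (by rw [htot]; omega)]
    rw [if_neg hin]
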